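-- pv_equiv track=rewrite | github.com/hanjaegyeong/algorithm | programmers/롤케이크자르기_구현(레벨2).py | solution
-- ===== SOURCE A (Python) =====
-- from collections import Counter
--
-- def solution(topping):
--     cnt = 0
--     # 철수, 동생 종류
--     A, B = set(), Counter(topping)
--     # 철수, 동생 개수
--     a, b = 0, len(B)
--     for i in topping:
--         B[i] -= 1
--         if B[i] == 0:
--             b -= 1
--         if not i in A:
--             A.add(i)
--             a += 1
--         if a == b:
--             cnt += 1
--     return cnt
-- ===== SOURCE B (Python) =====
-- def solution(topping):
--     # after[i] = number of distinct toppings strictly to the right of index i,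
--     # built in one reverse pass; then one forward pass compares it with the
--     # running distinct count of the left part.
--     after = []
--     seen = set()
--     for x in reversed(topping):
--         after.append(len(seen))
--         seen.add(x)
--     after.reverse()
--     seen = set()
--     cnt = 0
--     for x, rest in zip(topping, after):
--         seen.add(x)
--         if len(seen) == rest:
--             cnt += 1
--     return cnt
-- ===== Notes on version B (the rewrite author's own statement) =====
-- stated objective: alternative
-- what changed: Instead of one interleaved scan that decrements a Counter of the whole list while growing a prefix set, B first builds a suffix distinct-count table in a reverse pass and then does an independent forward pass comparing the running prefix distinct count against that table.
import Mathlib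
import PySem

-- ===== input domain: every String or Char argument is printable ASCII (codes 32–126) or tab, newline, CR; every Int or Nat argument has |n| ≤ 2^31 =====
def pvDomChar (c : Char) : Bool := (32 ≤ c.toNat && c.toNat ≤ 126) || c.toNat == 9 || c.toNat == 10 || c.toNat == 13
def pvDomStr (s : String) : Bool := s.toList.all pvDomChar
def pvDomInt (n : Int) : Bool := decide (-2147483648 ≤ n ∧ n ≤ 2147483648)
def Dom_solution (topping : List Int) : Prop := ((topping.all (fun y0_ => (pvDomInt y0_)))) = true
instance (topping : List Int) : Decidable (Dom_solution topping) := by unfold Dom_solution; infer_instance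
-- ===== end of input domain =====

-- B replaces A's interleaved Counter-decrement scan by a reverse pass building a
-- suffix distinct-count table plus an independent forward comparison pass (alternative decomposition, same cost).

-- ===== PORT A =====
def solution (topping : List Int) : Int :=
  let B0 : PySem.Dict Int Int := PySem.Dict.counter topping
  let st := topping.foldl
    (fun (st : Int × PySem.Set Int × PySem.Dict Int Int × Int × Int) i =>
      let cnt := st.1; let A := st.2.1; let B := st.2.2.1
      let a := st.2.2.2.1; let b := st.2.2.2.2
      let B := B.modify i 0 (· - 1)               -- B[i] -= 1
      let b := if B.getD i 0 = 0 then b - 1 else b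
      let Aa : PySem.Set Int × Int :=
        if PySem.Set.contains A i then (A, a) else (PySem.Set.add A i, a + 1)
      let cnt := if Aa.2 = b then cnt + 1 else cnt
      (cnt, Aa.1, B, Aa.2, b))
    (0, PySem.Set.empty, B0, 0, (B0.size : Int))
  st.1

-- ===== PORT B =====
def solution_alt (topping : List Int) : Int :=
  -- reverse pass: after[i] = distinct count strictly right of i
  let p := topping.reverse.foldl
    (fun (st : List Int × PySem.Set Int) x =>
      (st.1 ++ [PySem.Set.len st.2], PySem.Set.add st.2 x))
    ([], PySem.Set.empty)
  let after := p.1.reverse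
  -- forward pass: compare running prefix distinct count with the table
  let q := (topping.zip after).foldl
    (fun (st : PySem.Set Int × Int) pr =>
      let seen := PySem.Set.add st.1 pr.1
      (seen, if PySem.Set.len seen = pr.2 then st.2 + 1 else st.2))
    (PySem.Set.empty, 0)
  q.2

-- ===== PRECONDITION & SPEC =====
def Spec_solution (topping : List Int) (out : Int) : Prop := out = solution_alt topping
instance (topping : List Int) (out : Int) : Decidable (Spec_solution topping out) := by unfold Spec_solution; infer_instance

-- ===== CLAIM (what is proved, stated in full; the proofs are below) =====
def Claim_equal_solution : Prop := ∀ (topping : List Int), Dom_solution topping → Spec_solution topping (solution topping)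

-- ===== LEMMAS AND PROOFS =====

-- common reference: number of cut positions, scanning rest with prefix set s
def specCount (s : PySem.Set Int) : List Int → Int
  | [] => 0
  | x :: xs =>
      (if ((PySem.Set.add s x).length : Int) = ((PySem.Set.ofList xs).length : Int) then 1 else 0)
        + specCount (PySem.Set.add s x) xs

theorem len_ofList_reverse (l : List Int) :
    (PySem.Set.ofList l.reverse).length = (PySem.Set.ofList l).length := by
  apply List.Perm.length_eq
  rw [List.perm_ext_iff_of_nodup (PySem.Set.nodup_ofList _) (PySem.Set.nodup_ofList _)]
  intro a; simp [PySem.Set.mem_ofList]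

theorem len_ofList_cons (x : Int) (xs : List Int) :
    (PySem.Set.ofList (x :: xs)).length
      = (PySem.Set.ofList xs).length + (if x ∈ xs then 0 else 1) := by
  have h1 : (PySem.Set.ofList (x :: xs)).length
      = (PySem.Set.ofList (xs.reverse ++ [x])).length := by
    rw [← len_ofList_reverse (x :: xs)]; simp
  rw [h1, PySem.Set.ofList_append_singleton]
  by_cases hx : x ∈ xs
  · rw [PySem.Set.add_of_mem (by simp [PySem.Set.mem_ofList, hx])]
    simp [hx, len_ofList_reverse]
  · rw [PySem.Set.add_of_not_mem (by simp [PySem.Set.mem_ofList, hx])]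
    simp [hx, len_ofList_reverse]

theorem A_loop (rest : List Int) (cnt : Int) (s : PySem.Set Int)
    (d : PySem.Dict Int Int) (b : Int)
    (hd : ∀ y, d.getD y 0 = (rest.count y : Int))
    (hb : b = ((PySem.Set.ofList rest).length : Int)) :
    (rest.foldl
      (fun (st : Int × PySem.Set Int × PySem.Dict Int Int × Int × Int) i =>
        let cnt := st.1; let A := st.2.1; let B := st.2.2.1
        let a := st.2.2.2.1; let b := st.2.2.2.2
        let B := B.modify i 0 (· - 1)
        let b := if B.getD i 0 = 0 then b - 1 else b
        let Aa : PySem.Set Int × Int :=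
          if PySem.Set.contains A i then (A, a) else (PySem.Set.add A i, a + 1)
        let cnt := if Aa.2 = b then cnt + 1 else cnt
        (cnt, Aa.1, B, Aa.2, b))
      (cnt, s, d, (s.length : Int), b)).1 = cnt + specCount s rest := by
  induction rest generalizing cnt s d b with
  | nil => simp [specCount]
  | cons x xs ih =>
    have hdx : (d.modify x 0 (· - 1)).getD x 0 = (xs.count x : Int) := by
      rw [PySem.Dict.getD_modify_self, hd x]
      simp
    have hd' : ∀ y, (d.modify x 0 (· - 1)).getD y 0 = (xs.count y : Int) := by
      intro y
      by_cases hy : y = x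
      · subst hy; exact hdx
      · rw [PySem.Dict.getD_modify_of_ne _ _ _ hy, hd y, List.count_cons]
        simp [Ne.symm hy]
    have hb' : (if (d.modify x 0 (· - 1)).getD x 0 = 0 then b - 1 else b)
        = ((PySem.Set.ofList xs).length : Int) := by
      rw [hdx, hb, len_ofList_cons]
      by_cases hx : x ∈ xs
      · have hnz : ((xs.count x : Int)) ≠ 0 := by
          have := List.count_pos_iff.mpr hx
          omega
        rw [if_neg hnz, if_pos hx]
        simp
      · rw [if_pos (by simp [List.count_eq_zero_of_not_mem hx]), if_neg hx]
        push_cast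
        ring
    have hstep :
        ((fun (st : Int × PySem.Set Int × PySem.Dict Int Int × Int × Int) i =>
          let cnt := st.1; let A := st.2.1; let B := st.2.2.1
          let a := st.2.2.2.1; let b := st.2.2.2.2
          let B := B.modify i 0 (· - 1)
          let b := if B.getD i 0 = 0 then b - 1 else b
          let Aa : PySem.Set Int × Int :=
            if PySem.Set.contains A i then (A, a) else (PySem.Set.add A i, a + 1)
          let cnt := if Aa.2 = b then cnt + 1 else cnt
          (cnt, Aa.1, B, Aa.2, b))
          (cnt, s, d, (s.length : Int), b) x)
        = ((if ((PySem.Set.add s x).length : Int) = ((PySem.Set.ofList xs).length : Int)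
              then cnt + 1 else cnt),
            PySem.Set.add s x, d.modify x 0 (· - 1),
            ((PySem.Set.add s x).length : Int), ((PySem.Set.ofList xs).length : Int)) := by
      simp only []
      rw [hb']
      by_cases hm : x ∈ s
      · have hc : PySem.Set.contains s x = true := by
          simpa [PySem.Set.contains] using hm
        simp [hm]
      · have hc : PySem.Set.contains s x = false := by
          simpa [PySem.Set.contains] using hm
        simp [hm, List.length_append]
    show (List.foldl (fun (st : Int × PySem.Set Int × PySem.Dict Int Int × Int × Int) i =>
          let cnt := st.1; let A := st.2.1; let B := st.2.2.1
          let a := st.2.2.2.1; let b := st.2.2.2.2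
          let B := B.modify i 0 (· - 1)
          let b := if B.getD i 0 = 0 then b - 1 else b
          let Aa : PySem.Set Int × Int :=
            if PySem.Set.contains A i then (A, a) else (PySem.Set.add A i, a + 1)
          let cnt := if Aa.2 = b then cnt + 1 else cnt
          (cnt, Aa.1, B, Aa.2, b))
      ((fun (st : Int × PySem.Set Int × PySem.Dict Int Int × Int × Int) i =>
          let cnt := st.1; let A := st.2.1; let B := st.2.2.1
          let a := st.2.2.2.1; let b := st.2.2.2.2
          let B := B.modify i 0 (· - 1)
          let b := if B.getD i 0 = 0 then b - 1 else b
          let Aa : PySem.Set Int × Int :=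
            if PySem.Set.contains A i then (A, a) else (PySem.Set.add A i, a + 1)
          let cnt := if Aa.2 = b then cnt + 1 else cnt
          (cnt, Aa.1, B, Aa.2, b))
        (cnt, s, d, (s.length : Int), b) x) xs).1 = cnt + specCount s (x :: xs)
    rw [hstep]
    rw [ih _ _ _ _ hd' rfl]
    simp only [specCount]
    split_ifs with hc <;> ring

theorem B_revloop (ys : List Int) (l : List Int) (s : PySem.Set Int) :
    (ys.foldl
      (fun (st : List Int × PySem.Set Int) x =>
        (st.1 ++ [PySem.Set.len st.2], PySem.Set.add st.2 x)) (l, s)).1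
    = l ++ (List.range ys.length).map
        (fun k => PySem.Set.len (List.foldl PySem.Set.add s (ys.take k))) := by
  induction ys generalizing l s with
  | nil => simp
  | cons y ys ih =>
    simp only [List.foldl_cons]
    rw [ih]
    simp only [List.length_cons, List.range_succ_eq_map]
    simp [List.map_map, Function.comp, List.take_succ_cons]

theorem B_zip (xs : List Int) (aft : List Int) (s : PySem.Set Int) (cnt : Int)
    (hlen : aft.length = xs.length)
    (haft : ∀ i (h : i < aft.length),
        aft[i] = ((PySem.Set.ofList (xs.drop (i + 1))).length : Int)) :
    ((xs.zip aft).foldl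
      (fun (st : PySem.Set Int × Int) pr =>
        let seen := PySem.Set.add st.1 pr.1
        (seen, if PySem.Set.len seen = pr.2 then st.2 + 1 else st.2)) (s, cnt)).2
    = cnt + specCount s xs := by
  induction xs generalizing aft s cnt with
  | nil => simp [specCount]
  | cons x xs ih =>
    cases aft with
    | nil => simp at hlen
    | cons a0 aft =>
      have h0 := haft 0 (by simp)
      simp only [List.getElem_cons_zero, List.drop_succ_cons, List.drop_zero] at h0
      simp only [List.zip_cons_cons, List.foldl_cons]
      rw [ih aft _ _ (by simpa using hlen)
        (fun i h => by
          have := haft (i + 1) (by simpa using Nat.succ_lt_succ h)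
          simpa using this)]
      simp only [specCount, PySem.Set.len, h0]
      split_ifs with hc <;> ring

-- ===== VERDICT (by name: the statement is the Claim_ definition above) =====
theorem solution_spec : Claim_equal_solution := by
  intro topping _
  unfold Spec_solution solution solution_alt
  simp only []
  -- A's side
  have hsize : ((PySem.Dict.counter topping).size : Int)
      = ((PySem.Set.ofList topping).length : Int) := by
    have : (PySem.Dict.counter topping).keys = PySem.Set.ofList topping :=
      PySem.Dict.keys_counter topping
    have hlen : (PySem.Dict.counter topping).size = (PySem.Set.ofList topping).length := by
      rw [← this]; simp [PySem.Dict.keys, PySem.Dict.size]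
    exact_mod_cast hlen
  have hA := A_loop topping 0 PySem.Set.empty (PySem.Dict.counter topping)
      ((PySem.Dict.counter topping).size : Int)
      (fun y => by simp [PySem.Dict.getD_counter]) hsize
  have hAz : ((0 : Int), (PySem.Set.empty : PySem.Set Int), PySem.Dict.counter topping,
      ((PySem.Set.empty : PySem.Set Int).length : Int),
      ((PySem.Dict.counter topping).size : Int))
      = ((0 : Int), (PySem.Set.empty : PySem.Set Int), PySem.Dict.counter topping,
      (0 : Int), ((PySem.Dict.counter topping).size : Int)) := by
    simp [PySem.Set.empty]
  rw [hAz] at hA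
  rw [hA]
  -- B's side
  have hrev := B_revloop topping.reverse [] PySem.Set.empty
  rw [hrev]
  simp only [List.nil_append]
  have hn : topping.reverse.length = topping.length := by simp
  rw [B_zip topping _ PySem.Set.empty 0
    (by simp [hn])
    (fun i h => by
      have hi : i < topping.length := by simpa using h
      rw [List.getElem_reverse]
      simp only [List.length_map, List.length_range, List.length_reverse,
        List.getElem_map, List.getElem_range]
      have htk : topping.reverse.take (topping.length - 1 - i)
          = (topping.drop (i + 1)).reverse := by
        rw [List.take_reverse,
          show topping.length - (topping.length - 1 - i) = i + 1 from by omega]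
      rw [htk]
      have : List.foldl PySem.Set.add (PySem.Set.empty : PySem.Set Int)
          (topping.drop (i + 1)).reverse
          = PySem.Set.ofList (topping.drop (i + 1)).reverse := by
        rw [PySem.Set.ofList_eq_foldl]; rfl
      rw [this]
      simp [PySem.Set.len, len_ofList_reverse])]
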